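-- pv_equiv track=rewrite | github.com/dissonancehelix/Helix | helix/research/invariants/math/cross_domain_sce_probe.py | classify_game_isomer
-- ===== SOURCE A (Python) =====
-- GAME_ISOMER_TAGS = {
--     "DCP-L (action/reflexive)": {
--         "Action", "FPS", "Shooter", "Beat 'em up", "Fighting", "Arcade",
--         "Hack and Slash", "Run & Gun", "Real-Time", "Fast-Paced",
--         "Platformer", "Racing", "Sports",
--     },
--     "DCP-S (RPG/planning)": {
--         "RPG", "Strategy", "Turn-Based", "Turn-Based Strategy", "JRPG",
--         "CRPG", "Tactical RPG", "Tactics", "4X", "Grand Strategy",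
--         "Management", "City Builder", "Simulation", "Roguelike", "Roguelite",
--     },
--     "DCP-C (narrative/deferred)": {
--         "Story Rich", "Adventure", "Visual Novel", "Walking Simulator",
--         "Puzzle", "Mystery", "Narrative", "Interactive Fiction",
--         "Point & Click", "Exploration", "Atmospheric",
--     },
-- }
--
-- def classify_game_isomer(tags: dict[str, int]) -> str:
--     if not tags:
--         return "unclassified"
--     tag_set = set(tags.keys())
--     scores = {isomer: sum(tags.get(t, 0) for t in tag_names & tag_set)
--               for isomer, tag_names in GAME_ISOMER_TAGS.items()}
--     best = max(scores, key=lambda k: scores[k])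
--     return best if scores[best] > 0 else "unclassified"
-- ===== SOURCE B (Python) =====
-- GAME_ISOMER_TAGS = {
--     "DCP-L (action/reflexive)": {
--         "Action", "FPS", "Shooter", "Beat 'em up", "Fighting", "Arcade",
--         "Hack and Slash", "Run & Gun", "Real-Time", "Fast-Paced",
--         "Platformer", "Racing", "Sports",
--     },
--     "DCP-S (RPG/planning)": {
--         "RPG", "Strategy", "Turn-Based", "Turn-Based Strategy", "JRPG",
--         "CRPG", "Tactical RPG", "Tactics", "4X", "Grand Strategy",
--         "Management", "City Builder", "Simulation", "Roguelike", "Roguelite",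
--     },
--     "DCP-C (narrative/deferred)": {
--         "Story Rich", "Adventure", "Visual Novel", "Walking Simulator",
--         "Puzzle", "Mystery", "Narrative", "Interactive Fiction",
--         "Point & Click", "Exploration", "Atmospheric",
--     },
-- }
--
-- # reverse index: tag -> isomer name, built once at module load
-- _TAG_TO_ISOMER = {t: iso for iso, ts in GAME_ISOMER_TAGS.items() for t in ts}
--
-- _L = "DCP-L (action/reflexive)"
-- _S = "DCP-S (RPG/planning)"
-- _C = "DCP-C (narrative/deferred)"
--
--
-- def classify_game_isomer(tags: dict[str, int]) -> str:
--     if not tags: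
--         return "unclassified"
--     l = s = c = 0
--     for t, v in tags.items():
--         iso = _TAG_TO_ISOMER.get(t)
--         if iso == _L:
--             l += v
--         elif iso == _S:
--             s += v
--         elif iso == _C:
--             c += v
--     # first maximal category in GAME_ISOMER_TAGS order, like max() over the dict
--     if l >= s and l >= c:
--         best, score = _L, l
--     elif s >= c:
--         best, score = _S, s
--     else:
--         best, score = _C, c
--     return best if score > 0 else "unclassified"
-- ===== Notes on version B (the rewrite author's own statement) =====
-- stated objective: alternative
-- what changed: A scores each category by building set(tags.keys()), intersecting it with every category's tag set and looking each matching tag up in the dict, then takes max over the score dict; B precomputes a tag-to-isomer reverse index once at module load and makes a single pass over tags.items() with three running totals, picking the first maximal category by direct comparison.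
import Mathlib
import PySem

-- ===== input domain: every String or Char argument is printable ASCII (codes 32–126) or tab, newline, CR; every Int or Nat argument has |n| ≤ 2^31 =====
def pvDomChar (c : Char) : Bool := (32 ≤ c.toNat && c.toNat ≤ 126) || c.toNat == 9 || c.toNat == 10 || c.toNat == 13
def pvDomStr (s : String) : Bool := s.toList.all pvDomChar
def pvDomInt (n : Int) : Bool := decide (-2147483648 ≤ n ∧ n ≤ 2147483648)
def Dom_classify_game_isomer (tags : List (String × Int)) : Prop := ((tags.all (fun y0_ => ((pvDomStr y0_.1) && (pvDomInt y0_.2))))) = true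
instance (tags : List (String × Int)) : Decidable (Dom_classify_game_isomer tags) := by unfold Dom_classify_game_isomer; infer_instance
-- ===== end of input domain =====

-- B replaces A's per-category scoring (intersect each category's tag set with the dict's key set and look
-- every tag up in the dict) by a single pass over the dict's items with a precomputed tag→isomer reverse
-- index and three running totals; objective: alternative.

-- ===== PORT A =====
-- GAME_ISOMER_TAGS: category name → set of tag strings
def pvIsoTagsA : List (String × PySem.Set String) :=
  [("DCP-L (action/reflexive)", PySem.Set.ofList
      ["Action", "FPS", "Shooter", "Beat 'em up", "Fighting", "Arcade",
       "Hack and Slash", "Run & Gun", "Real-Time", "Fast-Paced",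
       "Platformer", "Racing", "Sports"]),
   ("DCP-S (RPG/planning)", PySem.Set.ofList
      ["RPG", "Strategy", "Turn-Based", "Turn-Based Strategy", "JRPG",
       "CRPG", "Tactical RPG", "Tactics", "4X", "Grand Strategy",
       "Management", "City Builder", "Simulation", "Roguelike", "Roguelite"]),
   ("DCP-C (narrative/deferred)", PySem.Set.ofList
      ["Story Rich", "Adventure", "Visual Novel", "Walking Simulator",
       "Puzzle", "Mystery", "Narrative", "Interactive Fiction",
       "Point & Click", "Exploration", "Atmospheric"])]

def classify_game_isomer (tags : List (String × Int)) : String :=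
  if tags.isEmpty then "unclassified" else               -- if not tags
  let d := PySem.Dict.ofList tags
  let tagSet : PySem.Set String := PySem.Set.ofList d.keys
  let scores : PySem.Dict String Int :=
    PySem.Dict.ofList (pvIsoTagsA.map (fun p =>
      (p.1, ((PySem.Set.inter p.2 tagSet).map (fun t => d.getD t 0)).sum)))
  match PySem.List.max? scores.keys (fun k => scores.getD k 0) with
  | some best => if scores.getD best 0 > 0 then best else "unclassified"
  | none => "unclassified"

-- ===== PORT B =====
-- GAME_ISOMER_TAGS as written in Source B (category name → tags)
def pvGameIsoTagsB : List (String × List String) :=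
  [("DCP-L (action/reflexive)",
      ["Action", "FPS", "Shooter", "Beat 'em up", "Fighting", "Arcade",
       "Hack and Slash", "Run & Gun", "Real-Time", "Fast-Paced",
       "Platformer", "Racing", "Sports"]),
   ("DCP-S (RPG/planning)",
      ["RPG", "Strategy", "Turn-Based", "Turn-Based Strategy", "JRPG",
       "CRPG", "Tactical RPG", "Tactics", "4X", "Grand Strategy",
       "Management", "City Builder", "Simulation", "Roguelike", "Roguelite"]),
   ("DCP-C (narrative/deferred)",
      ["Story Rich", "Adventure", "Visual Novel", "Walking Simulator",
       "Puzzle", "Mystery", "Narrative", "Interactive Fiction",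
       "Point & Click", "Exploration", "Atmospheric"])]
def pvRevIndex : PySem.Dict String String :=
  PySem.Dict.ofList (pvGameIsoTagsB.flatMap (fun p => p.2.map (fun t => (t, p.1))))
def pvLName : String := "DCP-L (action/reflexive)"
def pvSName : String := "DCP-S (RPG/planning)"
def pvCName : String := "DCP-C (narrative/deferred)"

-- loop body of B's single pass ("for t, v in tags.items()": add v to the matched category's total)
def pvStepB (acc : Int × Int × Int) (kv : String × Int) : Int × Int × Int :=
  let iso := pvRevIndex.get? kv.1
  if iso == some pvLName then (acc.1 + kv.2, acc.2.1, acc.2.2)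
  else if iso == some pvSName then (acc.1, acc.2.1 + kv.2, acc.2.2)
  else if iso == some pvCName then (acc.1, acc.2.1, acc.2.2 + kv.2)
  else acc

def classify_game_isomer_alt (tags : List (String × Int)) : String :=
  if tags.isEmpty then "unclassified" else
  let d := PySem.Dict.ofList tags
  let r := d.items.foldl pvStepB (0, 0, 0)
  let bs : String × Int :=
    if r.1 ≥ r.2.1 ∧ r.1 ≥ r.2.2 then (pvLName, r.1)
    else if r.2.1 ≥ r.2.2 then (pvSName, r.2.1)
    else (pvCName, r.2.2)
  if bs.2 > 0 then bs.1 else "unclassified"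

-- ===== PRECONDITION & SPEC =====
def Spec_classify_game_isomer (tags : List (String × Int)) (out : String) : Prop := out = classify_game_isomer_alt tags
instance (tags : List (String × Int)) (out : String) : Decidable (Spec_classify_game_isomer tags out) := by unfold Spec_classify_game_isomer; infer_instance

-- ===== CLAIM (what is proved, stated in full; the proofs are below) =====
def Claim_equal_classify_game_isomer : Prop := ∀ (tags : List (String × Int)), Dom_classify_game_isomer tags → Spec_classify_game_isomer tags (classify_game_isomer tags)

-- ===== LEMMAS AND PROOFS =====

-- the three category tag lists as plain lists
def pvCatsL : List String :=
  ["Action", "FPS", "Shooter", "Beat 'em up", "Fighting", "Arcade",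
   "Hack and Slash", "Run & Gun", "Real-Time", "Fast-Paced",
   "Platformer", "Racing", "Sports"]
def pvCatsS : List String :=
  ["RPG", "Strategy", "Turn-Based", "Turn-Based Strategy", "JRPG",
   "CRPG", "Tactical RPG", "Tactics", "4X", "Grand Strategy",
   "Management", "City Builder", "Simulation", "Roguelike", "Roguelite"]
def pvCatsC : List String :=
  ["Story Rich", "Adventure", "Visual Novel", "Walking Simulator",
   "Puzzle", "Mystery", "Narrative", "Interactive Fiction",
   "Point & Click", "Exploration", "Atmospheric"]

-- sum of the values of the entries whose key satisfies p
def pvSumIf (p : String → Bool) (l : List (String × Int)) : Int :=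
  (l.map (fun kv => if p kv.1 then kv.2 else 0)).sum

-- lookup of t in an association list, default 0 (definitionally PySem.Dict.getD on the items)
def pvLook (l : List (String × Int)) (t : String) : Int :=
  ((l.find? (fun p => p.1 == t)).map (fun x => x.2)).getD 0

-- a block of the reverse index: tags of one category, all mapped to that category's name
theorem blockFind (cats : List String) (n k : String) :
    ((cats.map (fun t => (t, n))).find? (fun p => p.1 == k)) =
      if cats.contains k then some (k, n) else none := by
  induction cats with
  | nil => simp
  | cons t ts ih =>
    by_cases h : t = k
    · subst h; simp
    · simp [h, ih, beq_iff_eq, Ne.symm h]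

set_option maxRecDepth 4096 in
theorem revItems : pvRevIndex.items =
    pvCatsL.map (fun t => (t, pvLName)) ++ pvCatsS.map (fun t => (t, pvSName))
      ++ pvCatsC.map (fun t => (t, pvCName)) := by decide


-- the reverse index, characterised: first category containing the tag, in declaration order
theorem pvRevIndex_get? (k : String) :
    pvRevIndex.get? k =
      if pvCatsL.contains k then some pvLName
      else if pvCatsS.contains k then some pvSName
      else if pvCatsC.contains k then some pvCName
      else none := by
  show Option.map _ (List.find? _ pvRevIndex.items) = _
  rw [revItems, List.find?_append, List.find?_append, blockFind, blockFind, blockFind]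
  split_ifs <;> simp [Option.or]



-- the three category tag lists are pairwise disjoint
theorem disjLS : ∀ k ∈ pvCatsL, k ∉ pvCatsS := by decide
theorem disjLC : ∀ k ∈ pvCatsL, k ∉ pvCatsC := by decide
theorem disjSC : ∀ k ∈ pvCatsS, k ∉ pvCatsC := by decide

-- B's fold, characterised: each component is the sum of the values with keys in its category
theorem pvFoldB (l : List (String × Int)) (a b c : Int) :
    l.foldl pvStepB (a, b, c)
    = (a + pvSumIf (fun k => pvCatsL.contains k) l,
       b + pvSumIf (fun k => pvCatsS.contains k) l,
       c + pvSumIf (fun k => pvCatsC.contains k) l) := by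
  induction l generalizing a b c with
  | nil => simp [pvSumIf]
  | cons kv t ih =>
    rw [List.foldl_cons]
    by_cases hL : pvCatsL.contains kv.1
    · have hS : ¬ pvCatsS.contains kv.1 := by
        simpa using disjLS kv.1 (by simpa using hL)
      have hC : ¬ pvCatsC.contains kv.1 := by
        simpa using disjLC kv.1 (by simpa using hL)
      have hL' : kv.1 ∈ pvCatsL := by simpa using hL
      have hS' : kv.1 ∉ pvCatsS := by simpa using hS
      have hC' : kv.1 ∉ pvCatsC := by simpa using hC
      have hstep : pvStepB (a, b, c) kv = (a + kv.2, b, c) := by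
        simp [pvStepB, pvRevIndex_get?, pvLName, pvSName, pvCName, hL']
      rw [hstep, ih]
      simp [pvSumIf, hL', hS', hC', pvLName, pvSName, pvCName, add_assoc]
    · have hL' : kv.1 ∉ pvCatsL := by simpa using hL
      by_cases hS : pvCatsS.contains kv.1
      · have hC : ¬ pvCatsC.contains kv.1 := by
          simpa using disjSC kv.1 (by simpa using hS)
        have hS' : kv.1 ∈ pvCatsS := by simpa using hS
        have hC' : kv.1 ∉ pvCatsC := by simpa using hC
        have hstep : pvStepB (a, b, c) kv = (a, b + kv.2, c) := by
          simp [pvStepB, pvRevIndex_get?, pvLName, pvSName, pvCName, hL', hS']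
        rw [hstep, ih]
        simp [pvSumIf, hL', hS', hC', pvLName, pvSName, pvCName, add_assoc]
      · have hS' : kv.1 ∉ pvCatsS := by simpa using hS
        by_cases hC : pvCatsC.contains kv.1
        · have hC' : kv.1 ∈ pvCatsC := by simpa using hC
          have hstep : pvStepB (a, b, c) kv = (a, b, c + kv.2) := by
            simp [pvStepB, pvRevIndex_get?, pvLName, pvSName, pvCName, hL', hS', hC']
          rw [hstep, ih]
          simp [pvSumIf, hL', hS', hC', pvLName, pvSName, pvCName, add_assoc]
        · have hC' : kv.1 ∉ pvCatsC := by simpa using hC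
          have hstep : pvStepB (a, b, c) kv = (a, b, c) := by
            simp [pvStepB, pvRevIndex_get?, pvLName, pvSName, pvCName, hL', hS', hC']
          rw [hstep, ih]
          simp [pvSumIf, hL', hS', hC', pvLName, pvSName, pvCName]

theorem pvFilterMapSum {α : Type} (l : List α) (p : α → Bool) (f : α → Int) :
    ((l.filter p).map f).sum = (l.map (fun x => if p x then f x else 0)).sum := by
  induction l with
  | nil => rfl
  | cons x t ih =>
    by_cases h : p x <;> simp [List.filter_cons, h, ih]

theorem pvSumSingle (cats : List String) (k : String) (v : Int) (h : String → Int)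
    (hc : cats.Nodup) (hk : h k = 0) :
    (cats.map (fun t => if t = k then v else h t)).sum
      = (if k ∈ cats then v else 0) + (cats.map h).sum := by
  induction cats with
  | nil => simp
  | cons t ts ih =>
    rcases List.nodup_cons.mp hc with ⟨htts, hts⟩
    by_cases ht : t = k
    · subst ht
      have hmap : ts.map (fun t' => if t' = t then v else h t') = ts.map h := by
        apply List.map_congr_left
        intro x hx
        have : x ≠ t := fun h' => htts (h' ▸ hx)
        simp [this]
      simp [hmap, hk]

    · have : k ∈ t :: ts ↔ k ∈ ts := by
        constructor
        · intro h'; rcases List.mem_cons.mp h' with h' | h'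
          · exact absurd h'.symm ht
          · exact h'
        · exact fun h' => List.mem_cons_of_mem _ h'
      simp only [List.map_cons, List.sum_cons, ih hts, ht, if_false, this]
      ring

-- A's per-category lookup sum equals B's per-entry sum, when the keys are unique
theorem pvSumA (l : List (String × Int)) (cats : List String)
    (hl : (l.map Prod.fst).Nodup) (hc : cats.Nodup) :
    (cats.map (fun t => if t ∈ l.map Prod.fst then pvLook l t else 0)).sum
      = pvSumIf (fun k => cats.contains k) l := by
  induction l with
  | nil => simp [pvSumIf]
  | cons kv rest ih =>
    obtain ⟨k, v⟩ := kv
    rcases List.nodup_cons.mp hl with ⟨hk, hrest⟩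
    have hfun : cats.map (fun t => if t ∈ ((k, v) :: rest).map Prod.fst then pvLook ((k, v) :: rest) t else 0)
        = cats.map (fun t => if t = k then v else (if t ∈ rest.map Prod.fst then pvLook rest t else 0)) := by
      apply List.map_congr_left
      intro t _
      by_cases ht : t = k
      · subst ht
        simp [pvLook, List.find?]
      · have hb : (k == t) = false := by simp [Ne.symm ht]
        have hlook : pvLook ((k, v) :: rest) t = pvLook rest t := by
          simp [pvLook, List.find?, hb]
        rw [hlook]
        rw [List.map_cons]
        by_cases hm : t ∈ rest.map Prod.fst
        · rw [if_pos (List.mem_cons_of_mem _ hm), if_pos hm, if_neg ht]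
        · rw [if_neg (by simp [ht, hm]), if_neg hm, if_neg ht]
    rw [hfun, pvSumSingle cats k v _ hc (by simp [hk])]
    rw [ih hrest]
    simp [pvSumIf]

-- the two programs agree on every input
set_option maxRecDepth 8192 in
theorem pvMain (tags : List (String × Int)) :
    classify_game_isomer tags = classify_game_isomer_alt tags := by
  by_cases hE : tags.isEmpty
  · simp [classify_game_isomer, classify_game_isomer_alt, hE]
  · have hn : (PySem.Dict.ofList tags).keys.Nodup := PySem.Dict.nodup_keys_ofList tags
    set d := PySem.Dict.ofList tags with hd
    have hkeys : d.keys = d.items.map Prod.fst := rfl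
    have hln : (d.items.map Prod.fst).Nodup := hkeys ▸ hn
    -- A's per-category score equals pvSumIf
    have hscore : ∀ (cats : List String), cats.Nodup →
        ((cats.filter (fun t => (PySem.Set.ofList d.keys).contains t)).map
            (fun t => d.getD t 0)).sum = pvSumIf (fun k => cats.contains k) d.items := by
      intro cats hc
      rw [PySem.Set.ofList_eq_self_of_nodup _ hn]
      rw [pvFilterMapSum]
      have : cats.map (fun t => if PySem.Set.contains d.keys t then d.getD t 0 else 0)
          = cats.map (fun t => if t ∈ d.items.map Prod.fst then pvLook d.items t else 0) := by
        apply List.map_congr_left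
        intro t _
        by_cases hm : t ∈ d.items.map Prod.fst
        · rw [if_pos (by simpa [hkeys] using hm), if_pos hm]; rfl
        · rw [if_neg (by simpa [hkeys] using hm), if_neg hm]
      rw [this, pvSumA d.items cats hln hc]
    have hL := hscore pvCatsL (by decide)
    have hS := hscore pvCatsS (by decide)
    have hC := hscore pvCatsC (by decide)
    rw [classify_game_isomer, classify_game_isomer_alt, if_neg (by simpa using hE),
      if_neg (by simpa using hE)]
    simp only [← hd]
    rw [pvFoldB d.items 0 0 0]
    have eqL : (PySem.Set.ofList
      ["Action", "FPS", "Shooter", "Beat 'em up", "Fighting", "Arcade",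
       "Hack and Slash", "Run & Gun", "Real-Time", "Fast-Paced",
       "Platformer", "Racing", "Sports"]) = pvCatsL := by decide
    have eqS : (PySem.Set.ofList
      ["RPG", "Strategy", "Turn-Based", "Turn-Based Strategy", "JRPG",
       "CRPG", "Tactical RPG", "Tactics", "4X", "Grand Strategy",
       "Management", "City Builder", "Simulation", "Roguelike", "Roguelite"]) = pvCatsS := by decide
    have eqC : (PySem.Set.ofList
      ["Story Rich", "Adventure", "Visual Novel", "Walking Simulator",
       "Puzzle", "Mystery", "Narrative", "Interactive Fiction",
       "Point & Click", "Exploration", "Atmospheric"]) = pvCatsC := by decide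
    have hinter : ∀ (s : PySem.Set String) (t : PySem.Set String),
        PySem.Set.inter s t = s.filter (fun x => t.contains x) := fun _ _ => rfl
    simp only [pvIsoTagsA, List.map_cons, List.map_nil, eqL, eqS, eqC, hinter, hL, hS, hC]
    set SL := pvSumIf (fun k => pvCatsL.contains k) d.items with hSL
    set SS := pvSumIf (fun k => pvCatsS.contains k) d.items with hSS
    set SC := pvSumIf (fun k => pvCatsC.contains k) d.items with hSC
    simp only [zero_add]
    have hmk : (PySem.Dict.ofList
        [("DCP-L (action/reflexive)", SL), ("DCP-S (RPG/planning)", SS),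
         ("DCP-C (narrative/deferred)", SC)])
        = PySem.Dict.mk [("DCP-L (action/reflexive)", SL), ("DCP-S (RPG/planning)", SS),
         ("DCP-C (narrative/deferred)", SC)] := rfl
    rw [hmk]
    simp only [PySem.List.max?, PySem.Dict.keys, PySem.Dict.getD, PySem.Dict.get?,
      List.map_cons, List.map_nil, List.foldl_cons, List.foldl_nil, List.find?,
      PySem.Dict.items]
    simp only [pvLName, pvSName, pvCName]
    norm_num
    rw [show pvSumIf (fun k => pvCatsL.contains k) d.items = SL from hSL.symm] at *
    rw [show pvSumIf (fun k => pvCatsS.contains k) d.items = SS from hSS.symm] at *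
    rw [show pvSumIf (fun k => pvCatsC.contains k) d.items = SC from hSC.symm] at *
    clear_value SL SS SC
    clear hL hS hC hscore hSL hSS hSC hkeys hln hd eqL eqS eqC hmk hn hinter hE
    by_cases h1 : SL < SS
    · by_cases h2 : SS < SC
      · by_cases h3 : 0 < SC
        all_goals
          simp [PySem.List.max?, PySem.Dict.getD, PySem.Dict.get?, List.find?, h1, h2, h3,
            show ¬(SL ≥ SS ∧ SL ≥ SC) from by omega, show ¬(SS ≥ SC) from by omega]
      · by_cases h3 : 0 < SS
        all_goals
          simp [PySem.List.max?, PySem.Dict.getD, PySem.Dict.get?, List.find?, h1, h2, h3,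
            show ¬(SL ≥ SS ∧ SL ≥ SC) from by omega, show SS ≥ SC from by omega]
    · by_cases h2 : SL < SC
      · by_cases h3 : 0 < SC
        all_goals
          simp [PySem.List.max?, PySem.Dict.getD, PySem.Dict.get?, List.find?, h1, h2, h3,
            show ¬(SL ≥ SS ∧ SL ≥ SC) from by omega, show ¬(SS ≥ SC) from by omega]
      · by_cases h3 : 0 < SL
        all_goals
          simp [PySem.List.max?, PySem.Dict.getD, PySem.Dict.get?, List.find?, h1, h2, h3,
            show SL ≥ SS ∧ SL ≥ SC from by omega]


-- ===== VERDICT (by name: the statement is the Claim_ definition above) =====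
theorem classify_game_isomer_spec : Claim_equal_classify_game_isomer := by
  intro tags _
  exact pvMain tags
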